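-- pv_equiv track=rewrite | github.com/etvega/dev_2026_1_workshop1 | src/string/strings.py | eliminar_espacios_duplicados
-- ===== SOURCE A (Python) =====
-- def eliminar_espacios_duplicados(texto):
--     resultado = ""
--     anterior = ""
--     for c in texto:
--         if not (c == " " and anterior == " "):
--             resultado += c
--         anterior = c
--     return resultado
-- ===== SOURCE B (Python) =====
-- def eliminar_espacios_duplicados(texto):
--     partes = texto.split(" ")
--     if len(partes) == 1:
--         return partes[0]
--     medio = [p for p in partes[1:-1] if p]
--     return " ".join([partes[0]] + medio + [partes[-1]])
-- ===== Notes on version B (the rewrite author's own statement) =====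
-- stated objective: faster
-- what changed: Replaces A's character-by-character Python loop (previous-char flag, repeated string concatenation) by tokenising with str.split on the single-space separator, dropping the empty middle fragments produced by consecutive spaces, and rejoining with a single space; the per-character work moves into C-level split/join.
import Mathlib
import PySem

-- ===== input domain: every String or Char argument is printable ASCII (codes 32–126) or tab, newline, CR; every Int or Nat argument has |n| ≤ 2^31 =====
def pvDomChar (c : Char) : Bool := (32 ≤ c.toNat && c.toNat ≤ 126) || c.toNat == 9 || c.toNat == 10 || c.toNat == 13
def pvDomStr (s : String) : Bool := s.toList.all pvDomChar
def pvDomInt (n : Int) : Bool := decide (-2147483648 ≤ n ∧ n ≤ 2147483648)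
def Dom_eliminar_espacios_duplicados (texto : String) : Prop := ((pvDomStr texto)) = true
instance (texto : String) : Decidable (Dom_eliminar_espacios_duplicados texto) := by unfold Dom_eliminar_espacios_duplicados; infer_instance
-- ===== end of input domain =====

-- B replaces A's character-by-character scan with split-on-" " / filter / join-with-" " (idiomatic tokenise-then-join).

-- ===== PORT A =====
-- A: scan the characters, appending each char unless it is a space directly after a space.
def eliminar_espacios_duplicados (texto : String) : String :=
  let st := texto.toList.foldl
    (fun (st : List Char × List Char) c =>
      let resultado := if ¬(c = ' ' ∧ st.2 = [' ']) then st.1 ++ [c] else st.1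
      (resultado, [c]))
    ([], [])
  String.mk st.1

-- ===== PORT B =====
-- B: split on the single-space separator, drop the empty middle fragments, rejoin with " ".
def eliminar_espacios_duplicados_alt (texto : String) : String :=
  let partes := PySem.Chars.splitOn texto.toList [' ']
  match partes with
  | [] => ""          -- unreachable: Python split never returns an empty list
  | [p] => String.mk p
  | p0 :: p1 :: ps =>
      let medio := (PySem.List.slice partes (some 1) (some (-1))).filter (fun p => p ≠ [])
      String.mk (PySem.Chars.join [' '] ([p0] ++ medio ++ [(p1 :: ps).getLast (List.cons_ne_nil _ _)]))

-- ===== PRECONDITION & SPEC =====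
def Spec_eliminar_espacios_duplicados (texto : String) (out : String) : Prop := out = eliminar_espacios_duplicados_alt texto
instance (texto : String) (out : String) : Decidable (Spec_eliminar_espacios_duplicados texto out) := by unfold Spec_eliminar_espacios_duplicados; infer_instance

-- ===== CLAIM (what is proved, stated in full; the proofs are below) =====
def Claim_equal_eliminar_espacios_duplicados : Prop := ∀ (texto : String), Dom_eliminar_espacios_duplicados texto → Spec_eliminar_espacios_duplicados texto (eliminar_espacios_duplicados texto)

-- ===== LEMMAS AND PROOFS =====

-- A's loop as structural recursion on the flag "previous char was a space".
def pvG : Bool → List Char → List Char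
  | _, [] => []
  | b, c :: cs => (if c = ' ' ∧ b = true then [] else [c]) ++ pvG (decide (c = ' ')) cs

-- structural single-space split
def pvSpl : List Char → List (List Char)
  | [] => [[]]
  | c :: cs =>
    if c = ' ' then [] :: pvSpl cs
    else match pvSpl cs with
      | [] => [[c]]
      | p :: ps => (c :: p) :: ps

-- structural description of splitOn.go's accumulator loop
def pvMygo : List Char → List Char → List (List Char)
  | [], cur => [cur.reverse]
  | c :: rest, cur => if c = ' ' then cur.reverse :: pvMygo rest [] else pvMygo rest (c :: cur)

def pvGlueT : List (List Char) → List Char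
  | [] => []
  | [p] => p
  | p :: q :: ps => if p = [] then pvGlueT (q :: ps) else p ++ ' ' :: pvGlueT (q :: ps)

def pvGlue : List (List Char) → List Char
  | [] => []
  | [p] => p
  | p :: q :: ps => p ++ ' ' :: pvGlueT (q :: ps)

theorem pvFoldA (cs : List Char) : ∀ (res ant : List Char),
    (List.foldl (fun (st : List Char × List Char) c =>
      let resultado := if ¬(c = ' ' ∧ st.2 = [' ']) then st.1 ++ [c] else st.1
      (resultado, [c])) (res, ant) cs).1 = res ++ pvG (decide (ant = [' '])) cs := by
  induction cs with
  | nil => intro res ant; simp [pvG]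
  | cons c cs ih =>
    intro res ant
    simp only [List.foldl_cons]
    rw [ih]
    by_cases h : c = ' ' ∧ ant = [' '] <;>
      simp [pvG, h, List.append_assoc] <;> simp_all <;> tauto

theorem pvGo_eq (fuel : Nat) : ∀ (l cur : List Char) (acc : List (List Char)),
    l.length ≤ fuel →
    PySem.Chars.splitOn.go [' '] fuel l cur acc = acc.reverse ++ pvMygo l cur := by
  induction fuel with
  | zero =>
    intro l cur acc h
    have : l = [] := List.eq_nil_of_length_eq_zero (Nat.le_zero.mp h)
    subst this
    simp [PySem.Chars.splitOn.go, pvMygo]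
  | succ n ih =>
    intro l cur acc h
    match l with
    | [] => simp [PySem.Chars.splitOn.go, pvMygo]
    | c :: rest =>
      rw [PySem.Chars.splitOn.go]
      by_cases hc : c = ' '
      · subst hc
        simp only [List.isPrefixOf, BEq.rfl, Bool.true_and, if_pos]
        rw [ih _ _ _ (by simpa using Nat.le_of_succ_le_succ h)]
        simp [pvMygo]
      · have : ([' '].isPrefixOf (c :: rest)) = false := by
          simp [List.isPrefixOf]; exact fun hh => (hc (hh.symm)).elim
        rw [this]
        simp only [Bool.false_eq_true, if_false]
        rw [ih _ _ _ (by simpa using Nat.le_of_succ_le_succ h)]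
        simp [pvMygo, hc]

theorem pvSpl_ne_nil (cs : List Char) : pvSpl cs ≠ [] := by
  match cs with
  | [] => simp [pvSpl]
  | c :: cs =>
    by_cases h : c = ' '
    · simp [pvSpl, h]
    · simp only [pvSpl, h, if_false]
      match hs : pvSpl cs with
      | [] => simp
      | p :: ps => simp

theorem pvMygo_eq (cs : List Char) : ∀ cur,
    pvMygo cs cur = (pvSpl cs).modifyHead (cur.reverse ++ ·) := by
  induction cs with
  | nil => intro cur; simp [pvMygo, pvSpl]
  | cons c cs ih =>
    intro cur
    by_cases h : c = ' '
    · subst h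
      simp only [pvMygo, if_pos rfl, pvSpl, List.modifyHead]
      rw [ih []]
      match hs : pvSpl cs with
      | [] => exact absurd hs (pvSpl_ne_nil cs)
      | p :: ps => simp
    · simp only [pvMygo, h, if_false, pvSpl]
      rw [ih (c :: cur)]
      match hs : pvSpl cs with
      | [] => exact absurd hs (pvSpl_ne_nil cs)
      | p :: ps => simp

theorem pvSplitOn_eq (cs : List Char) : PySem.Chars.splitOn cs [' '] = pvSpl cs := by
  rw [PySem.Chars.splitOn, pvGo_eq _ _ _ _ (Nat.le_succ _), pvMygo_eq]
  match hs : pvSpl cs with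
  | [] => exact absurd hs (pvSpl_ne_nil cs)
  | p :: ps => simp

theorem pvMain (cs : List Char) :
    pvG false cs = pvGlue (pvSpl cs) ∧ pvG true cs = pvGlueT (pvSpl cs) := by
  induction cs with
  | nil => simp [pvG, pvSpl, pvGlue, pvGlueT]
  | cons c cs ih =>
    obtain ⟨ihF, ihT⟩ := ih
    by_cases h : c = ' '
    · subst h
      have e1 : pvG false (' ' :: cs) = ' ' :: pvG true cs := by simp [pvG]
      have e2 : pvG true (' ' :: cs) = pvG true cs := by simp [pvG]
      have e3 : pvSpl (' ' :: cs) = [] :: pvSpl cs := by simp [pvSpl]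
      rw [e1, e2, e3, ihT]
      match hs : pvSpl cs with
      | [] => exact absurd hs (pvSpl_ne_nil cs)
      | p :: ps => exact ⟨by simp [pvGlue, pvGlueT], by simp [pvGlueT]⟩
    · have e1 : ∀ b, pvG b (c :: cs) = c :: pvG false cs := by
        intro b; simp [pvG, h]
      have e3 : pvSpl (c :: cs) = match pvSpl cs with
          | [] => [[c]] | p :: ps => (c :: p) :: ps := by simp [pvSpl, h]
      rw [e1, e1, e3, ihF]
      match hs : pvSpl cs with
      | [] => exact absurd hs (pvSpl_ne_nil cs)
      | [p] => exact ⟨by simp [pvGlue, pvGlueT], by simp [pvGlue, pvGlueT]⟩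
      | p :: q :: ps => exact ⟨by simp [pvGlue, pvGlueT], by simp [pvGlue, pvGlueT]⟩

theorem pvGlueT_join (ps : List (List Char)) (h : ps ≠ []) :
    pvGlueT ps = PySem.Chars.join [' '] (ps.dropLast.filter (fun p => p ≠ []) ++ [ps.getLast h]) := by
  induction ps with
  | nil => exact absurd rfl h
  | cons p ps ih =>
    match ps with
    | [] => simp [pvGlueT, PySem.Chars.join_singleton]
    | q :: qs =>
      rw [show (p :: q :: qs).dropLast = p :: (q :: qs).dropLast from
        List.dropLast_cons_of_ne_nil (by simp),
        show (p :: q :: qs).getLast h = (q :: qs).getLast (by simp) from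
        List.getLast_cons (by simp), List.filter_cons]
      by_cases hp : p = []
      · subst hp
        have h1 : pvGlueT ([] :: q :: qs) = pvGlueT (q :: qs) := by simp [pvGlueT]
        rw [h1, ih (by simp)]
        simp
      · have h1 : pvGlueT (p :: q :: qs) = p ++ ' ' :: pvGlueT (q :: qs) := by
          simp [pvGlueT, hp]
        rw [h1, ih (by simp), if_pos (by simp [hp]), List.cons_append]
        have hne : (List.filter (fun p => decide (p ≠ [])) (q :: qs).dropLast
            ++ [(q :: qs).getLast (by simp)]) ≠ [] := by simp
        match hx : (List.filter (fun p => decide (p ≠ [])) (q :: qs).dropLast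
            ++ [(q :: qs).getLast (by simp)]) with
        | [] => exact absurd hx hne
        | x :: xs =>
          rw [PySem.Chars.join_cons_cons]
          simp

theorem pvSlice_middle (p0 : List Char) (ps : List (List Char)) :
    PySem.List.slice (p0 :: ps) (some 1) (some (-1)) = ps.dropLast := by
  simp [PySem.List.slice]
  rw [List.dropLast_eq_take]

-- ===== VERDICT (by name: the statement is the Claim_ definition above) =====
theorem eliminar_espacios_duplicados_spec : Claim_equal_eliminar_espacios_duplicados := by
  intro texto _
  unfold Spec_eliminar_espacios_duplicados
  simp only [eliminar_espacios_duplicados, eliminar_espacios_duplicados_alt, pvSplitOn_eq]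
  have hA : (List.foldl (fun (st : List Char × List Char) c =>
      let resultado := if ¬(c = ' ' ∧ st.2 = [' ']) then st.1 ++ [c] else st.1
      (resultado, [c])) ([], []) texto.toList).1 = pvG false texto.toList := by
    simpa using pvFoldA texto.toList [] []
  rw [hA, (pvMain texto.toList).1]
  match hs : pvSpl texto.toList with
  | [] => exact absurd hs (pvSpl_ne_nil texto.toList)
  | [p] => simp [pvGlue]
  | p0 :: p1 :: ps =>
    simp only
    rw [pvSlice_middle]
    congr 1
    rw [show pvGlue (p0 :: p1 :: ps) = p0 ++ ' ' :: pvGlueT (p1 :: ps) from by simp [pvGlue],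
      pvGlueT_join (p1 :: ps) (by simp)]
    have hne : (List.filter (fun p => decide (p ≠ [])) (p1 :: ps).dropLast
        ++ [(p1 :: ps).getLast (by simp)]) ≠ [] := by simp
    match hx : (List.filter (fun p => decide (p ≠ [])) (p1 :: ps).dropLast
        ++ [(p1 :: ps).getLast (by simp)]) with
    | [] => exact absurd hx hne
    | x :: xs =>
      rw [List.append_assoc, hx,
        show [p0] ++ (x :: xs) = p0 :: x :: xs from rfl, PySem.Chars.join_cons_cons]
      simp
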